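-- pv_equiv track=rewrite | github.com/dudamarlena/pyc_source | pycfiles/djingles-0.1.5-py3-none-any/extensions.cpython-36.py | _format_whitespace
-- ===== SOURCE A (Python) =====
-- def _format_whitespace(block):
--     blocks = []
--     current = []
--     empty = 0
--     for ln in block.strip().splitlines():
--         ln = ln.strip()
--         if not ln:
--             empty += 1
--         else:
--             empty = 0
--         if not ln:
--             if current:
--                 content = '<p>%s</p>' % '<br>'.join(current)
--                 current = []
--                 blocks.append(content)
--         if ln:
--             current.append(ln)
--         else:
--             if empty <= 2:
--                 blocks.append('<br>')
--
--     if current: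
--         content = '<p>%s</p>' % '<br>'.join(current)
--         blocks.append(content)
--     return ''.join(blocks)
-- ===== SOURCE B (Python) =====
-- def _format_whitespace(block):
--     lines = [ln.strip() for ln in block.strip().splitlines()]
--     out = []
--     i, n = 0, len(lines)
--     while i < n:
--         j = i
--         if lines[i]:
--             while j < n and lines[j]:
--                 j += 1
--             out.append('<p>' + '<br>'.join(lines[i:j]) + '</p>')
--         else:
--             while j < n and not lines[j]:
--                 j += 1
--             out.append('<br>' * min(j - i, 2))
--         i = j
--     return ''.join(out)
-- ===== Notes on version B (the rewrite author's own statement) =====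
-- stated objective: alternative
-- what changed: Replaced A's stateful per-line loop (flush-on-empty with an empty-line counter) by a run-based scan: group consecutive non-empty/empty lines and emit one paragraph element per non-empty run and min(k,2) break tags per empty run.
import Mathlib
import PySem

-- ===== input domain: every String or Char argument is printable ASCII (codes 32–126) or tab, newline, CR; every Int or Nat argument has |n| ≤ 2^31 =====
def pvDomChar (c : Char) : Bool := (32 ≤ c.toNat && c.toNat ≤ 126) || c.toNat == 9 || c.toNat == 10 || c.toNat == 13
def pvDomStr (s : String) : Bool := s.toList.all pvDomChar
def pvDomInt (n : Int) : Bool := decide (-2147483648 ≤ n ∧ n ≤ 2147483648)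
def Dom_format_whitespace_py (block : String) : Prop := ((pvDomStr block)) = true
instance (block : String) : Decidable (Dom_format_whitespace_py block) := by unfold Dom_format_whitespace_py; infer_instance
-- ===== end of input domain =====

-- B replaces A's stateful per-line flush/counter loop by a run-based scan (one paragraph
-- per non-empty run, min(k,2) line breaks per empty run): an alternative decomposition, same O(n) cost.


-- ===== PORT A =====
-- '<p>%s</p>' % '<br>'.join(cur)
def pvP (cur : List String) : String := "<p>" ++ PySem.Str.join "<br>" cur ++ "</p>"

-- one iteration of A's for-loop; state = (blocks, current, empty); ln0 is the raw line,
-- stripped at the top of the loop body exactly as in A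
def pvStepA (st : List String × List String × Nat) (ln0 : String) :
    List String × List String × Nat :=
  let ln := PySem.Str.strip ln0
  let (blocks, current, empty) := st
  let empty := if ln = "" then empty + 1 else 0
  let (blocks, current) :=
    if ln = "" then
      if current ≠ [] then (blocks ++ [pvP current], ([] : List String)) else (blocks, current)
    else (blocks, current)
  if ln ≠ "" then (blocks, current ++ [ln], empty)
  else if empty ≤ 2 then (blocks ++ ["<br>"], current, empty)
  else (blocks, current, empty)

def format_whitespace_py (block : String) : String :=
  let st := (PySem.Str.splitlines (PySem.Str.strip block)).foldl pvStepA ([], [], 0)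
  let blocks := if st.2.1 ≠ [] then st.1 ++ [pvP st.2.1] else st.1
  PySem.Str.join "" blocks

-- ===== PORT B =====
-- s * n (Python string repetition)
def pvStrRepeat (s : String) (n : Int) : String := String.ofList (PySem.List.pyRepeat s.toList n)

-- B's while-loop over runs: lines[i:j] (the inner while advancing j) is the
-- takeWhile prefix, and the next i = j is the dropWhile remainder.
def pvAltLoop : List String → String
  | [] => ""
  | l :: ls =>
    if l = "" then
      pvStrRepeat "<br>" (min ((1 + (ls.takeWhile (· == "")).length : Nat) : Int) 2) ++
        pvAltLoop (ls.dropWhile (· == ""))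
    else
      "<p>" ++ PySem.Str.join "<br>" (l :: ls.takeWhile (· != "")) ++ "</p>" ++
        pvAltLoop (ls.dropWhile (· != ""))
termination_by ls => ls.length
decreasing_by
  · exact Nat.lt_succ_of_le (List.length_dropWhile_le _ _)
  · exact Nat.lt_succ_of_le (List.length_dropWhile_le _ _)

def format_whitespace_py_alt (block : String) : String :=
  pvAltLoop ((PySem.Str.splitlines (PySem.Str.strip block)).map PySem.Str.strip)

-- ===== PRECONDITION & SPEC =====
def Spec_format_whitespace_py (block : String) (out : String) : Prop := out = format_whitespace_py_alt block
instance (block : String) (out : String) : Decidable (Spec_format_whitespace_py block out) := by unfold Spec_format_whitespace_py; infer_instance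

-- ===== CLAIM (what is proved, stated in full; the proofs are below) =====
def Claim_equal_format_whitespace_py : Prop := ∀ (block : String), Dom_format_whitespace_py block → Spec_format_whitespace_py block (format_whitespace_py block)

-- ===== LEMMAS AND PROOFS =====

-- common specification of both loops, over already-stripped lines
def pvG : List String → List String → Nat → String
  | [], cur, _ => if cur ≠ [] then pvP cur else ""
  | l :: ls, cur, e =>
    if l = "" then
      (if cur ≠ [] then pvP cur else "") ++ (if e + 1 ≤ 2 then "<br>" else "") ++ pvG ls [] (e + 1)
    else pvG ls (cur ++ [l]) 0

-- the <br>s an empty run of length k emits when entered with counter e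
def pvBrSeq : Nat → Nat → String
  | _, 0 => ""
  | e, k + 1 => (if e + 1 ≤ 2 then "<br>" else "") ++ pvBrSeq (e + 1) k

-- pvStepA on an already-stripped line
def pvStepA' (st : List String × List String × Nat) (ln : String) :
    List String × List String × Nat :=
  let (blocks, current, empty) := st
  let empty := if ln = "" then empty + 1 else 0
  let (blocks, current) :=
    if ln = "" then
      if current ≠ [] then (blocks ++ [pvP current], ([] : List String)) else (blocks, current)
    else (blocks, current)
  if ln ≠ "" then (blocks, current ++ [ln], empty)
  else if empty ≤ 2 then (blocks ++ ["<br>"], current, empty)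
  else (blocks, current, empty)

def pvFinalize (st : List String × List String × Nat) : List String :=
  if st.2.1 ≠ [] then st.1 ++ [pvP st.2.1] else st.1

lemma pvInterNil (l : List (List Char)) : [].intercalate l = l.flatten := by
  induction l with
  | nil => simp [List.intercalate]
  | cons h t ih =>
    cases t with
    | nil => simp [List.intercalate]
    | cons a b =>
      simp only [List.intercalate, List.intersperse] at *
      simp_all

lemma pvJoinS_append (l1 l2 : List String) :
    PySem.Str.join "" (l1 ++ l2) = PySem.Str.join "" l1 ++ PySem.Str.join "" l2 := by
  simp [PySem.Str.join, PySem.Chars.join, pvInterNil, ← String.ofList_append]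

lemma pvJoinS_single (x : String) : PySem.Str.join "" [x] = x := by
  simp [PySem.Str.join, PySem.Chars.join, pvInterNil]

lemma pvJoinS_pair (x y : String) : PySem.Str.join "" [x, y] = x ++ y := by
  have h := pvJoinS_append [x] [y]
  simpa [pvJoinS_single] using h

lemma pvLemA (ls : List String) :
    ∀ (blocks cur : List String) (e : Nat),
      PySem.Str.join "" (pvFinalize (ls.foldl pvStepA' (blocks, cur, e))) =
        PySem.Str.join "" blocks ++ pvG ls cur e := by
  induction ls with
  | nil =>
    intro blocks cur e
    by_cases hc : cur = [] <;>
      simp [pvFinalize, pvG, hc, pvJoinS_append, pvJoinS_single]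
  | cons l ls ih =>
    intro blocks cur e
    by_cases hl : l = ""
    · by_cases hc : cur = [] <;> by_cases he : e + 1 ≤ 2 <;>
        simp [pvStepA', pvG, hl, hc, he, ih, pvJoinS_append, pvJoinS_single, pvJoinS_pair,
          String.append_assoc]
    · simp [pvStepA', pvG, hl, ih]

lemma pvBrSeq_dead : ∀ (k e : Nat), 2 ≤ e → pvBrSeq e k = "" := by
  intro k
  induction k with
  | zero => intro e _; rfl
  | succ n ih =>
    intro e he
    have h1 : ¬ (e + 1 ≤ 2) := by omega
    simp [pvBrSeq, h1, ih (e + 1) (by omega)]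

lemma pvBrSeq_min : ∀ (k : Nat), pvBrSeq 0 k = pvStrRepeat "<br>" (min ((k : Nat) : Int) 2) := by
  intro k
  match k with
  | 0 => decide
  | 1 => decide
  | (n + 2) =>
    have h2 : min (((n + 2 : Nat)) : Int) 2 = 2 := by omega
    rw [h2]
    simp [pvBrSeq, pvBrSeq_dead n 2 (le_refl 2)]
    decide

lemma pvDropWhile_shape (p : String → Bool) (l : List String) :
    l.dropWhile p = [] ∨ ∃ x xs, l.dropWhile p = x :: xs ∧ p x = false := by
  induction l with
  | nil => exact Or.inl rfl
  | cons x xs ih =>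
    by_cases h : p x = true
    · simpa [h] using ih
    · exact Or.inr ⟨x, xs, by simp [h], by simpa using h⟩

lemma pvG_empty_run : ∀ (k : Nat) (rest : List String) (e : Nat),
    (rest = [] ∨ ∃ x xs, rest = x :: xs ∧ x ≠ "") →
    pvG (List.replicate k "" ++ rest) [] e = pvBrSeq e k ++ pvG rest [] 0 := by
  intro k rest e h
  induction k generalizing e with
  | zero =>
    rcases h with rfl | ⟨x, xs, rfl, hx⟩
    · simp [pvG, pvBrSeq]
    · simp [pvG, pvBrSeq, hx]
  | succ n ih =>
    simp [List.replicate_succ, pvG, pvBrSeq, ih, String.append_assoc]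

lemma pvG_nonempty_run : ∀ (run : List String), run ≠ [] → (∀ x ∈ run, x ≠ "") →
    ∀ (rest cur : List String) (e : Nat),
      pvG (run ++ rest) cur e = pvG rest (cur ++ run) 0 := by
  intro run
  induction run with
  | nil => intro h; exact absurd rfl h
  | cons a t ih =>
    intro _ hall rest cur e
    have ha : a ≠ "" := hall a List.mem_cons_self
    simp only [List.cons_append, pvG, if_neg ha]
    cases t with
    | nil => simp
    | cons b u =>
      have := ih (by simp) (fun x hx => hall x (List.mem_cons_of_mem _ hx)) rest (cur ++ [a]) 0
      simpa [List.append_assoc] using this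

lemma pvG_flush : ∀ (rest run : List String), run ≠ [] →
    (rest = [] ∨ ∃ xs, rest = "" :: xs) →
    pvG rest run 0 = pvP run ++ pvG rest [] 0 := by
  intro rest run hrun h
  rcases h with rfl | ⟨xs, rfl⟩
  · simp [pvG, hrun]
  · simp [pvG, hrun, String.append_assoc]

lemma pvTakeWhile_empty_repl (ls : List String) :
    ls.takeWhile (· == "") = List.replicate (ls.takeWhile (· == "")).length "" := by
  rw [List.eq_replicate_iff]
  exact ⟨rfl, fun b hb => by simpa using List.mem_takeWhile_imp hb⟩

lemma pvLemB : ∀ (ls : List String), pvAltLoop ls = pvG ls [] 0 := by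
  intro ls
  induction ls using pvAltLoop.induct with
  | case1 => simp [pvAltLoop, pvG]
  | case2 ls ih =>
    have hsplit : ("" :: ls : List String) =
        List.replicate (1 + (ls.takeWhile (· == "")).length) ""
          ++ ls.dropWhile (· == "") := by
      rw [Nat.add_comm, List.replicate_succ, List.cons_append]
      congr 1
      conv_lhs => rw [← List.takeWhile_append_dropWhile (p := (· == "")) (l := ls)]
      rw [← pvTakeWhile_empty_repl]
    have hshape : ls.dropWhile (· == "") = [] ∨
        ∃ x xs, ls.dropWhile (· == "") = x :: xs ∧ x ≠ "" := by
      rcases pvDropWhile_shape (· == "") ls with h | ⟨x, xs, hx, hpx⟩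
      · exact Or.inl h
      · exact Or.inr ⟨x, xs, hx, by simpa using hpx⟩
    conv_rhs => rw [hsplit]
    rw [pvG_empty_run _ _ _ hshape, pvBrSeq_min]
    rw [pvAltLoop]
    simp [ih]
  | case3 l ls hl ih =>
    have hsplit : l :: ls = (l :: ls.takeWhile (· != "")) ++ ls.dropWhile (· != "") := by
      simp [List.takeWhile_append_dropWhile]
    have hall : ∀ x ∈ l :: ls.takeWhile (· != ""), x ≠ "" := by
      intro x hx
      rcases List.mem_cons.mp hx with rfl | hx
      · exact hl
      · simpa using List.mem_takeWhile_imp hx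
    have hshape : ls.dropWhile (· != "") = [] ∨ ∃ xs, ls.dropWhile (· != "") = "" :: xs := by
      rcases pvDropWhile_shape (· != "") ls with h | ⟨x, xs, hx, hpx⟩
      · exact Or.inl h
      · refine Or.inr ⟨xs, ?_⟩
        have : x = "" := by simpa using hpx
        rwa [this] at hx
    conv_rhs => rw [hsplit]
    rw [pvG_nonempty_run _ (by simp) hall, List.nil_append,
      pvG_flush _ _ (by simp) hshape]
    rw [pvAltLoop]
    simp [hl, ih, pvP, String.append_assoc]

-- ===== VERDICT (by name: the statement is the Claim_ definition above) =====
theorem format_whitespace_py_spec : Claim_equal_format_whitespace_py := by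
  intro block _
  unfold Spec_format_whitespace_py format_whitespace_py format_whitespace_py_alt
  have hstep : (PySem.Str.splitlines (PySem.Str.strip block)).foldl pvStepA ([], [], 0)
      = ((PySem.Str.splitlines (PySem.Str.strip block)).map PySem.Str.strip).foldl pvStepA' ([], [], 0) := by
    rw [List.foldl_map]
    rfl
  rw [hstep]
  have := pvLemA ((PySem.Str.splitlines (PySem.Str.strip block)).map PySem.Str.strip) [] [] 0
  simp only [pvFinalize] at this
  rw [this, pvLemB]
  rw [show PySem.Str.join "" ([] : List String) = "" from rfl, String.empty_append]
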